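-- pv_equiv track=rewrite | github.com/timcypresswong/py_read_write | select_section.py | evaluate_discrete_function_difference
-- ===== SOURCE A (Python) =====
-- import copy
--
-- def evaluate_discrete_function_difference(intlist1, intlist2) -> int:
--     maxlength = max( len(intlist1), len(intlist2))
--     smalllist = None
--     biglist = None
--     if len(intlist1) < maxlength:
--         smalllist = copy.deepcopy(intlist1)
--         biglist = copy.deepcopy(intlist2)
--     else:
--         smalllist = copy.deepcopy(intlist2)
--         biglist = copy.deepcopy(intlist1)
--     for i in range(len(smalllist), maxlength):
--         smalllist.append(0)
--
--     sum_diff = 0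
--     for i in range(maxlength):
--         diff = abs(smalllist[i] - biglist[i])**2
--         sum_diff += diff
--     return sum_diff
-- ===== SOURCE B (Python) =====
-- def evaluate_discrete_function_difference(intlist1, intlist2) -> int:
--     m = min(len(intlist1), len(intlist2))
--     overlap = sum((a - b) ** 2 for a, b in zip(intlist1, intlist2))
--     longer = intlist1 if len(intlist2) <= len(intlist1) else intlist2
--     return overlap + sum(x ** 2 for x in longer[m:])
-- ===== Notes on version B (the rewrite author's own statement) =====
-- stated objective: simpler
-- what changed: Drops the deepcopy and explicit zero-padding: sums squared differences over the zipped overlap, then adds the plain squares of the longer list's tail (whose missing counterparts would be 0), instead of copying, padding and index-looping.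
import Mathlib
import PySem

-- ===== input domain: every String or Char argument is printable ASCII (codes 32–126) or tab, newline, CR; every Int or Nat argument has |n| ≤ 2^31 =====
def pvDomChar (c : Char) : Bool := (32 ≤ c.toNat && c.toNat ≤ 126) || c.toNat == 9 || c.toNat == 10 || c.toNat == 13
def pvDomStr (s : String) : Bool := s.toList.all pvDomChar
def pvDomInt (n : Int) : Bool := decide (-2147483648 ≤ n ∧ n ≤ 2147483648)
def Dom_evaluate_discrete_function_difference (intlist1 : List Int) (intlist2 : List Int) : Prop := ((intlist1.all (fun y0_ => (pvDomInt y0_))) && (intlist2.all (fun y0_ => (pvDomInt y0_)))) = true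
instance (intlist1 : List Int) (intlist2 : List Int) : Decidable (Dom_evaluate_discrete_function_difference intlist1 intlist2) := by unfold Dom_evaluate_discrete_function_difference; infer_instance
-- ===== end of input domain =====

-- B drops A's deepcopy and zero-padding: it sums squared differences over the zipped
-- overlap and then adds the squares of the longer list's tail (objective: simpler).


-- ===== PORT A =====
def evaluate_discrete_function_difference (intlist1 : List Int) (intlist2 : List Int) : Int :=
  let maxlength : Int := max (PySem.List.len intlist1) (PySem.List.len intlist2)
  -- 'if len(intlist1) < maxlength: small, big = l1, l2 else small, big = l2, l1' (deepcopy of int lists = the same values)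
  let p : List Int × List Int :=
    if PySem.List.len intlist1 < maxlength then (intlist1, intlist2) else (intlist2, intlist1)
  -- 'for i in range(len(smalllist), maxlength): smalllist.append(0)'
  let smalllist : List Int :=
    (PySem.List.pyRange (PySem.List.len p.1) maxlength).foldl (fun l _ => l ++ [(0 : Int)]) p.1
  -- 'for i in range(maxlength): sum_diff += abs(smalllist[i] - biglist[i]) ** 2'
  -- (indices are always in range here, so pyGetD with default 0 is exact)
  (PySem.List.pyRange 0 maxlength).foldl
    (fun acc i => acc + |PySem.List.pyGetD smalllist i 0 - PySem.List.pyGetD p.2 i 0| ^ 2) 0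

-- ===== PORT B =====
def evaluate_discrete_function_difference_alt (intlist1 : List Int) (intlist2 : List Int) : Int :=
  let m := min intlist1.length intlist2.length
  let overlap := ((intlist1.zip intlist2).map (fun q => (q.1 - q.2) ^ 2)).sum
  let longer := if intlist2.length ≤ intlist1.length then intlist1 else intlist2
  overlap + ((longer.drop m).map (fun x => x ^ 2)).sum

-- ===== PRECONDITION & SPEC =====
def Spec_evaluate_discrete_function_difference (intlist1 : List Int) (intlist2 : List Int) (out : Int) : Prop := out = evaluate_discrete_function_difference_alt intlist1 intlist2
instance (intlist1 : List Int) (intlist2 : List Int) (out : Int) : Decidable (Spec_evaluate_discrete_function_difference intlist1 intlist2 out) := by unfold Spec_evaluate_discrete_function_difference; infer_instance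

-- ===== CLAIM (what is proved, stated in full; the proofs are below) =====
def Claim_equal_evaluate_discrete_function_difference : Prop := ∀ (intlist1 : List Int) (intlist2 : List Int), Dom_evaluate_discrete_function_difference intlist1 intlist2 → Spec_evaluate_discrete_function_difference intlist1 intlist2 (evaluate_discrete_function_difference intlist1 intlist2)

-- ===== LEMMAS AND PROOFS =====

-- zipping a zero list against b and summing |0 - x|^2 is just summing x^2
theorem pv_repl_zip (b : List Int) :
    (((List.replicate b.length (0 : Int)).zip b).map (fun q => |q.1 - q.2| ^ 2)).sum
      = (b.map (fun x => x ^ 2)).sum := by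
  induction b with
  | nil => simp
  | cons c b ih =>
      simp only [List.length_cons, List.replicate_succ, List.zip_cons_cons, List.map_cons,
        List.sum_cons, zero_sub, sq_abs] at ih ⊢
      rw [ih]
      ring

-- padded-zip sum = overlap sum + squared tail of the longer list
theorem pv_main (s b : List Int) (h : s.length ≤ b.length) :
    (((s ++ List.replicate (b.length - s.length) (0 : Int)).zip b).map (fun q => |q.1 - q.2| ^ 2)).sum
      = ((s.zip b).map (fun q => (q.1 - q.2) ^ 2)).sum
        + ((b.drop s.length).map (fun x => x ^ 2)).sum := by
  induction s generalizing b with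
  | nil => simpa using pv_repl_zip b
  | cons a s ih =>
      cases b with
      | nil => simp at h
      | cons c b =>
          have hb : s.length ≤ b.length := by simpa using h
          have := ih b hb
          simp only [List.length_cons, Nat.succ_sub_succ, List.cons_append, List.zip_cons_cons,
            List.map_cons, List.sum_cons, List.drop_succ_cons, sq_abs] at this ⊢
          omega

-- the index loop over two equal-length lists is the zip sum
theorem pv_idx_sum (s b : List Int) (h : s.length = b.length) :
    (PySem.List.pyRange 0 (b.length : Int)).foldl
        (fun acc i => acc + |PySem.List.pyGetD s i 0 - PySem.List.pyGetD b i 0| ^ 2) 0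
      = ((s.zip b).map (fun q => |q.1 - q.2| ^ 2)).sum := by
  have hz : (s.zip b).length = b.length := by rw [List.length_zip]; omega
  have h1 : ∀ i, PySem.List.pyGetD s i 0 = (PySem.List.pyGetD (s.zip b) i ((0 : Int), (0 : Int))).1 := by
    intro i
    conv_lhs => rw [← List.map_fst_zip (l₂ := b) (le_of_eq h)]
    exact PySem.List.pyGetD_map Prod.fst (s.zip b) i (0, 0)
  have h2 : ∀ i, PySem.List.pyGetD b i 0 = (PySem.List.pyGetD (s.zip b) i ((0 : Int), (0 : Int))).2 := by
    intro i
    conv_lhs => rw [← List.map_snd_zip (l₁ := s) (le_of_eq h.symm)]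
    exact PySem.List.pyGetD_map Prod.snd (s.zip b) i (0, 0)
  simp only [h1, h2, ← hz]
  rw [PySem.List.foldl_pyRange_zero_pyGetD' (s.zip b) ((0 : Int), (0 : Int))
        (fun acc q => acc + |q.1 - q.2| ^ 2) 0,
      PySem.List.foldl_add]
  simp

-- the padding loop appends exactly (b.length - s.length) zeros
theorem pv_pad (s : List Int) (n : Int) :
    (PySem.List.pyRange (PySem.List.len s) n).foldl (fun l _ => l ++ [(0 : Int)]) s
      = s ++ List.replicate ((n - s.length).toNat) 0 := by
  rw [PySem.List.foldl_append_singleton_eq_map (fun _ => (0 : Int)), List.map_const',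
      PySem.List.length_pyRange_one, PySem.List.len]

-- A's value, for small list s and big list b with s.length ≤ b.length and maxlength = b.length
theorem pv_A_value (s b : List Int) (h : s.length ≤ b.length) :
    (PySem.List.pyRange 0 (b.length : Int)).foldl
        (fun acc i => acc +
          |PySem.List.pyGetD
              ((PySem.List.pyRange (PySem.List.len s) (b.length : Int)).foldl
                (fun l _ => l ++ [(0 : Int)]) s) i 0
            - PySem.List.pyGetD b i 0| ^ 2) 0
      = ((s.zip b).map (fun q => (q.1 - q.2) ^ 2)).sum
        + ((b.drop s.length).map (fun x => x ^ 2)).sum := by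
  rw [pv_pad]
  have hn : ((b.length : Int) - (s.length : Int)).toNat = b.length - s.length := by omega
  rw [hn, pv_idx_sum (s ++ List.replicate (b.length - s.length) 0) b (by simp; omega)]
  exact pv_main s b h

-- the zip's order does not matter for the sum of squared differences
theorem pv_swap (l1 l2 : List Int) :
    ((l2.zip l1).map (fun q => (q.1 - q.2) ^ 2)).sum
      = ((l1.zip l2).map (fun q => (q.1 - q.2) ^ 2)).sum := by
  rw [← List.zip_swap l1 l2, List.map_map]
  congr 1
  apply List.map_congr_left
  intro q _
  cases q
  simp only [Function.comp_apply, Prod.swap_prod_mk]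
  ring

-- ===== VERDICT (by name: the statement is the Claim_ definition above) =====
theorem evaluate_discrete_function_difference_spec : Claim_equal_evaluate_discrete_function_difference := by
  intro l1 l2 _
  unfold Spec_evaluate_discrete_function_difference
  unfold evaluate_discrete_function_difference evaluate_discrete_function_difference_alt
  simp only [PySem.List.len]
  by_cases hlt : (l1.length : Int) < (l2.length : Int)
  · -- l1 is strictly shorter: small = l1, big = l2
    have hle : l1.length ≤ l2.length := by omega
    have hmax : max (l1.length : Int) (l2.length : Int) = (l2.length : Int) := by omega
    have hlong : ¬ (l2.length ≤ l1.length) := by omega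
    simp only [hmax, if_pos hlt]
    have := pv_A_value l1 l2 hle
    simp only [PySem.List.len] at this
    rw [this]
    simp [hlong, Nat.min_eq_left hle]
  · -- l2 is no longer than l1: small = l2, big = l1
    have hle : l2.length ≤ l1.length := by omega
    have hmax : max (l1.length : Int) (l2.length : Int) = (l1.length : Int) := by omega
    simp only [hmax, if_neg (lt_irrefl ((l1.length : Int)))]
    have := pv_A_value l2 l1 hle
    simp only [PySem.List.len] at this
    rw [this, pv_swap l1 l2]
    simp [hle]
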